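-- pv_equiv track=rewrite | github.com/freyp567/mybookdb | mybookdb/bookshelf/management/commands/import_onleihe_merkzettel.py | get_link_name
-- ===== SOURCE A (Python) =====
-- def get_link_name(uri):
--     if not uri:
--         return 'onleihe'
--     steps = uri.split('/')
--     # 'mediaInfo,0-0-1198403364-200-0-0-0-0-0-0-0.html'
--     # see get_linkname_from_path
--     onleihe_id = steps[-1].split(',')[1][:-5]
--     while onleihe_id.endswith('-0'):
--         onleihe_id = onleihe_id[:-2]
--     return 'onleihe-%s' % onleihe_id
-- ===== SOURCE B (Python) =====
-- def get_link_name(uri):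
--     if not uri:
--         return 'onleihe'
--     fields = uri.split('/')[-1].split(',')[1][:-5].split('-')
--     while len(fields) > 1 and fields[-1] == '0':
--         fields.pop()
--     return 'onleihe-' + '-'.join(fields)
-- ===== Notes on version B (the rewrite author's own statement) =====
-- stated objective: alternative
-- what changed: B tokenizes the id on '-' and drops trailing '0' fields before re-joining, instead of A's character-level loop that repeatedly strips a two-character '-0' suffix.
import Mathlib
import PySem

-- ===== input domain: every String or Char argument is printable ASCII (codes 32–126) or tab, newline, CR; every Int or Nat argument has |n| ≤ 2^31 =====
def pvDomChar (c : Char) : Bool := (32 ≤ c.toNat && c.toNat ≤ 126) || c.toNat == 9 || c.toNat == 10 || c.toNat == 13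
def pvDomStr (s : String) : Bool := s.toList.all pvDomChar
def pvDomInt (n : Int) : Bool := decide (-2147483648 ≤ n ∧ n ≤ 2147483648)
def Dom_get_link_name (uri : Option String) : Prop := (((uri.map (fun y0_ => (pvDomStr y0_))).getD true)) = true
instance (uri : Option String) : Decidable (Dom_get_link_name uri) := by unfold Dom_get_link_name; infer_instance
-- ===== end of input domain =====

-- B replaces A's character-level while-loop stripping trailing "-0" by splitting the id
-- on '-' and dropping trailing "0" fields before re-joining (alternative decomposition).

-- ===== PORT A =====

-- the while-loop of A: strip a trailing "-0" as long as there is one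
def stripDashZero (cs : List Char) : List Char :=
  if h : PySem.Chars.endswith cs ['-', '0'] then
    stripDashZero (PySem.Chars.slice cs none (some (-2)))
  else cs
termination_by cs.length
decreasing_by
  rcases (PySem.Chars.endswith_iff cs ['-', '0']).mp h with ⟨t, ht⟩
  subst ht
  rw [PySem.Chars.slice_eq_listSlice, PySem.List.slice_to_neg_ofNat _ 2 (by omega)]
  simp

def get_link_name (uri : Option String) : String :=
  match uri with
  | none => "onleihe"                                  -- `if not uri` (None)
  | some s =>
    if s.toList.isEmpty then "onleihe"                 -- `if not uri` ('' is falsy)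
    else
      let steps := PySem.Chars.splitOn s.toList ['/']
      -- steps[-1].split(',')[1][:-5]; steps is never empty, and Pre_ guarantees index 1 exists
      let onleihe_id := PySem.Chars.slice
        ((PySem.List.pyGet? (PySem.Chars.splitOn ((PySem.List.pyGet? steps (-1)).getD []) [',']) 1).getD [])
        none (some (-5))
      String.mk ("onleihe-".toList ++ stripDashZero onleihe_id)

-- ===== PORT B =====

-- B's while-loop: pop trailing "0" fields while more than one field remains
def dropZeroFields (fields : List (List Char)) : List (List Char) :=
  if 1 < fields.length ∧ fields.getLast? = some ['0'] then
    dropZeroFields fields.dropLast                      -- fields.pop()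
  else fields
termination_by fields.length
decreasing_by
  rename_i h
  have := h.1
  simp [List.length_dropLast]
  omega

def get_link_name_alt (uri : Option String) : String :=
  match uri with
  | none => "onleihe"
  | some s =>
    if s.toList.isEmpty then "onleihe"
    else
      let steps := PySem.Chars.splitOn s.toList ['/']
      let onleihe_id := PySem.Chars.slice
        ((PySem.List.pyGet? (PySem.Chars.splitOn ((PySem.List.pyGet? steps (-1)).getD []) [',']) 1).getD [])
        none (some (-5))
      let fields := dropZeroFields (PySem.Chars.splitOn onleihe_id ['-'])
      String.mk ("onleihe-".toList ++ PySem.Chars.join ['-'] fields)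

-- ===== PRECONDITION & SPEC =====
-- Pre_ excludes exactly the inputs on which Python A raises IndexError: a non-empty uri
-- whose segment after the last '/' contains no comma (steps[-1].split(',')[1] fails).
def Pre_get_link_name (uri : Option String) : Prop :=
  match uri with
  | none => True
  | some s => s.toList = [] ∨
      ',' ∈ (PySem.List.pyGet? (PySem.Chars.splitOn s.toList ['/']) (-1)).getD []
instance (uri : Option String) : Decidable (Pre_get_link_name uri) := by
  unfold Pre_get_link_name; rcases uri with _ | s <;> infer_instance

def pvWitness_get_link_name : Option String :=
  some "x/mediaInfo,0-0-1198403364-200-0-0-0-0-0-0-0.html"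

def Spec_get_link_name (uri : Option String) (out : String) : Prop := out = get_link_name_alt uri
instance (uri : Option String) (out : String) : Decidable (Spec_get_link_name uri out) := by
  unfold Spec_get_link_name; infer_instance

-- ===== CLAIM (what is proved, stated in full; the proofs are below) =====
def Claim_equal_get_link_name : Prop := ∀ (uri : Option String), Dom_get_link_name uri → Pre_get_link_name uri → Spec_get_link_name uri (get_link_name uri)

-- ===== LEMMAS AND PROOFS =====

-- PySem.Chars.splitOn on a single-character separator is Mathlib's List.splitOn
theorem splitOn_go_single (c : Char) (fuel : Nat) (l cur : List Char) (acc : List (List Char))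
    (h : l.length < fuel) :
    PySem.Chars.splitOn.go [c] fuel l cur acc =
      acc.reverse ++ List.modifyHead (cur.reverse ++ ·) (List.splitOn c l) := by
  induction fuel generalizing l cur acc with
  | zero => omega
  | succ f ih =>
    cases l with
    | nil => simp [PySem.Chars.splitOn.go, List.splitOn_nil]
    | cons a t =>
      by_cases hac : a = c
      · subst hac
        rw [PySem.Chars.splitOn.go]
        have hpre : [a].isPrefixOf (a :: t) = true := by simp [List.isPrefixOf]
        rw [if_pos hpre]
        have hdrop : List.drop [a].length (a :: t) = t := by simp
        rw [hdrop, ih _ _ _ (by simp only [List.length_cons] at h; omega)]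
        cases hsp : List.splitOnP (fun x => x == a) t <;>
          simp [List.splitOn, List.splitOnP_cons, hsp]
      · rw [PySem.Chars.splitOn.go]
        have : [c].isPrefixOf (a :: t) = false := by
          simp [List.isPrefixOf]
          intro hh; exact absurd hh.symm hac
        simp only [this, Bool.false_eq_true, if_false]
        rw [ih _ _ _ (by simpa using h)]
        have hPa : (a == c) = false := by simp [hac]
        simp [List.splitOn, List.splitOnP_cons, hPa, List.modifyHead_modifyHead]
        rcases List.splitOnP (· == c) t with _ | ⟨x, xs⟩ <;> simp [Function.comp]

theorem splitOn_single (c : Char) (cs : List Char) :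
    PySem.Chars.splitOn cs [c] = List.splitOn c cs := by
  rw [PySem.Chars.splitOn, splitOn_go_single c _ _ _ _ (by omega)]
  rcases List.splitOn c cs with _ | ⟨x, xs⟩ <;> simp

-- splitting at an explicit separator occurrence splits the list
theorem splitOn_append_sep (c : Char) (ds es : List Char) :
    List.splitOn c (ds ++ c :: es) = List.splitOn c ds ++ List.splitOn c es := by
  induction ds with
  | nil => simp [List.splitOn, List.splitOnP_cons]
  | cons d t ih =>
    by_cases hdc : d = c
    · subst hdc
      simp [List.splitOn, List.splitOnP_cons] at *
      exact ih
    · have hPd : (d == c) = false := by simp [hdc]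
      simp only [List.cons_append, List.splitOn, List.splitOnP_cons, hPd,
        Bool.false_eq_true, if_false] at *
      rw [ih]
      have := List.splitOnP_ne_nil (· == c) t
      rcases h : List.splitOnP (· == c) t with _ | ⟨x, xs⟩
      · exact absurd h this
      · simp

-- re-joining a split at an explicit trailing piece
theorem intercalate_concat (c : Char) (qs : List (List Char)) (l : List Char) (h : qs ≠ []) :
    [c].intercalate (qs ++ [l]) = [c].intercalate qs ++ c :: l := by
  induction qs with
  | nil => exact absurd rfl h
  | cons q t ih =>
    cases t with
    | nil => simp [List.intercalate]
    | cons q' t' =>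
      have := ih (by simp)
      simp only [List.intercalate, List.cons_append] at *
      simp_all

-- the main equivalence: A's character stripping = B's field dropping
theorem strip_eq_fields (cs : List Char) :
    stripDashZero cs = PySem.Chars.join ['-'] (dropZeroFields (PySem.Chars.splitOn cs ['-'])) := by
  rw [splitOn_single, PySem.Chars.join]
  by_cases h : PySem.Chars.endswith cs ['-', '0'] = true
  · rcases (PySem.Chars.endswith_iff cs ['-', '0']).mp h with ⟨ds, hds⟩
    subst hds
    rw [stripDashZero.eq_def]
    simp only [h, dite_true]
    have hslice : PySem.Chars.slice (ds ++ ['-', '0']) none (some (-2)) = ds := by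
      simp [PySem.Chars.slice_eq_listSlice,
        PySem.List.slice_to_neg_ofNat (ds ++ ['-', '0']) 2 (by omega)]
    rw [hslice]
    have hsplit : List.splitOn '-' (ds ++ ['-', '0']) = List.splitOn '-' ds ++ [['0']] := by
      have := splitOn_append_sep '-' ds ['0']
      simpa [List.splitOn, List.splitOnP_cons] using this
    rw [hsplit]
    rw [dropZeroFields]
    have hne := List.splitOnP_ne_nil (· == '-') ds
    have hcond : 1 < (List.splitOn '-' ds ++ [['0']]).length ∧
        (List.splitOn '-' ds ++ [['0']]).getLast? = some ['0'] := by
      constructor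
      · have : List.splitOn '-' ds ≠ [] := hne
        have := List.length_pos_iff.mpr this
        simp [List.length_append]; omega
      · exact List.getLast?_concat
    simp only [hcond, and_self, if_true, List.dropLast_concat]
    have := strip_eq_fields ds
    rw [splitOn_single, PySem.Chars.join] at this
    exact this
  · rw [stripDashZero.eq_def]
    simp only [h, Bool.false_eq_true, dite_false]
    rw [dropZeroFields]
    have hnot : ¬ (1 < (List.splitOn '-' cs).length ∧
        (List.splitOn '-' cs).getLast? = some ['0']) := by
      rintro ⟨hlen, hlast⟩
      rcases List.eq_nil_or_concat (List.splitOn '-' cs) with hnil | ⟨qs, l, hql⟩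
      · exact List.splitOnP_ne_nil _ _ hnil
      · rw [List.concat_eq_append] at hql
        rw [hql] at hlast hlen
        rw [List.getLast?_concat] at hlast
        have hl : l = ['0'] := by injection hlast
        have hqs : qs ≠ [] := by
          rintro rfl; simp at hlen
        have : cs = ['-'].intercalate (List.splitOn '-' cs) := by
          rw [List.intercalate_splitOn]
        rw [hql, hl, intercalate_concat '-' qs ['0'] hqs] at this
        have : PySem.Chars.endswith cs ['-', '0'] = true := by
          rw [PySem.Chars.endswith_iff, this]
          exact ⟨['-'].intercalate qs, by simp⟩
        exact h this
    simp only [hnot, if_false]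
    rw [List.intercalate_splitOn]
termination_by cs.length
decreasing_by subst hds; simp

-- ===== VERDICT (by name: the statement is the Claim_ definition above) =====
theorem get_link_name_spec : Claim_equal_get_link_name := by
  intro uri _ _
  unfold Spec_get_link_name get_link_name get_link_name_alt
  rcases uri with _ | s
  · rfl
  · simp only
    by_cases hs : s.toList.isEmpty
    · simp [hs]
    · simp only [hs, Bool.false_eq_true, if_false]
      rw [strip_eq_fields]
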